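-- pv_equiv track=rewrite | github.com/dobolicious/css-minify | compile.py | stripper
-- ===== SOURCE A (Python) =====
-- def stripper(text, index):
--
--     stripped = ""
--     options = ["{", ":", ","]
--
--     arr = text.split(options[index])
--     count = 0
--
--     for split in arr:
--         strip = split.strip()
--         stripped += strip
--         if count < len(arr) - 1:
--             stripped += options[index]
--
--         count = count + 1
--
--     index = index + 1
--     if index < len(options):
--         return stripper(stripped, index)
--     else:
--
--         return stripped
-- ===== SOURCE B (Python) =====
-- def stripper(text, index):
--     options = ["{", ":", ","]
--     while True:
--         d = options[index]
--         text = d.join(s.strip() for s in text.split(d))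
--         index += 1
--         if index >= len(options):
--             return text
-- ===== Notes on version B (the rewrite author's own statement) =====
-- stated objective: simpler
-- what changed: A's tail recursion over the delimiter index with a hand-rolled count/accumulator string build is replaced by a single while-loop over the same delimiter list whose body is one idiomatic d.join(s.strip() for s in text.split(d)) pass.
import Mathlib
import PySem

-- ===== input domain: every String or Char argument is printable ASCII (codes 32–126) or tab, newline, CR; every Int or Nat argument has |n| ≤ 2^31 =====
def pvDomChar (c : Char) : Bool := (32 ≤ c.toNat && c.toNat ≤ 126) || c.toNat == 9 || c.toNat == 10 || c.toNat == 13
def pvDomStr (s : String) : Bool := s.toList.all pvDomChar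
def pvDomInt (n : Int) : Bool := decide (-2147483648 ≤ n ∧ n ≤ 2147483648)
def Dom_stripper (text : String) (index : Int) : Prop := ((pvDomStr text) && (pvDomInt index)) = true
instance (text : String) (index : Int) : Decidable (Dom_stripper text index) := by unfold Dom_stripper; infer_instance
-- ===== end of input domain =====

-- B replaces A's tail recursion + hand-rolled count/accumulator build by an iterative
-- while-loop whose body is one idiomatic join-of-stripped-splits pass (objective: simpler).


-- ===== PORT A =====
-- the body of A's 'for split in arr' loop, with n = len(arr)
def stripperBody (d : String) (n : Nat) (st : String × Nat) (split : String) : String × Nat :=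
  let strip := PySem.Str.strip split
  let stripped := st.1 ++ strip
  let stripped := if st.2 < n - 1 then stripped ++ d else stripped
  (stripped, st.2 + 1)

def stripper (text : String) (index : Int) : String :=
  match PySem.List.pyGet? (["{", ":", ","] : List String) index with
  | none => ""   -- options[index] raises IndexError in Python; excluded by Pre_
  | some d =>
    -- text.split(d): d is always a nonempty string here, so split? is exact (some)
    let arr := (PySem.Str.split? text d).getD []
    let stripped := (arr.foldl (stripperBody d arr.length) ("", 0)).1
    let index := index + 1
    if index < ((["{", ":", ","] : List String).length : Int) then stripper stripped index else stripped
termination_by (2 - index).toNat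
decreasing_by simp_all; omega

-- ===== PORT B =====
def stripper_alt (text : String) (index : Int) : String :=
  match PySem.List.pyGet? (["{", ":", ","] : List String) index with
  | none => ""   -- options[index] raises IndexError in Python; excluded by Pre_
  | some d =>
    -- d.join(s.strip() for s in text.split(d)); d nonempty, split? exact
    let text := PySem.Str.join d (((PySem.Str.split? text d).getD []).map PySem.Str.strip)
    let index := index + 1
    if index ≥ ((["{", ":", ","] : List String).length : Int) then text else stripper_alt text index
termination_by (2 - index).toNat
decreasing_by simp_all; omega

-- ===== PRECONDITION & SPEC =====
-- Pre_ excludes exactly the indices on which options[index] raises IndexError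
-- (Python list indexing accepts -3 ≤ index < 3 for a 3-element list).
def Pre_stripper (text : String) (index : Int) : Prop := -3 ≤ index ∧ index < 3
instance (text : String) (index : Int) : Decidable (Pre_stripper text index) := by
  unfold Pre_stripper; infer_instance
def pvWitness_stripper : String × Int := ("a { b : c , d", 0)

def Spec_stripper (text : String) (index : Int) (out : String) : Prop := out = stripper_alt text index
instance (text : String) (index : Int) (out : String) : Decidable (Spec_stripper text index out) := by unfold Spec_stripper; infer_instance

-- ===== CLAIM (what is proved, stated in full; the proofs are below) =====
def Claim_equal_stripper : Prop := ∀ (text : String) (index : Int), Dom_stripper text index → Pre_stripper text index → Spec_stripper text index (stripper text index)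

-- ===== LEMMAS AND PROOFS =====

theorem str_join_nil (sep : String) : PySem.Str.join sep [] = "" := by
  apply String.ext
  simp [PySem.Str.toList_join, PySem.Chars.join_nil]

theorem str_join_singleton (sep p : String) : PySem.Str.join sep [p] = p := by
  apply String.ext
  simp [PySem.Str.toList_join, PySem.Chars.join_singleton]

theorem str_join_cons_cons (sep p q : String) (rest : List String) :
    PySem.Str.join sep (p :: q :: rest) = p ++ sep ++ PySem.Str.join sep (q :: rest) := by
  apply String.ext
  simp [PySem.Str.toList_join, PySem.Chars.join_cons_cons]

theorem str_empty_append (s : String) : "" ++ s = s := by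
  apply String.ext; simp

theorem fold_eq_join (d : String) (n : Nat) :
    ∀ (l : List String) (acc : String) (c : Nat), c + l.length = n →
      (l.foldl (stripperBody d n) (acc, c)).1
        = acc ++ PySem.Str.join d (l.map PySem.Str.strip) := by
  intro l
  induction l with
  | nil => intro acc c h; simp [str_join_nil]
  | cons x l ih =>
    intro acc c h
    match l with
    | [] =>
      have hc : ¬ c < n - 1 := by simp at h; omega
      simp [stripperBody, hc, str_join_singleton]
    | y :: rest =>
      have hc : c < n - 1 := by simp at h; omega
      rw [List.foldl_cons]
      have hstep : stripperBody d n (acc, c) x = (acc ++ PySem.Str.strip x ++ d, c + 1) := by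
        simp [stripperBody, hc]
      rw [hstep, ih _ (c + 1) (by simp at h ⊢; omega)]
      simp only [List.map_cons]
      rw [str_join_cons_cons]
      apply String.ext
      simp [List.append_assoc]

theorem stripper_eq_alt : ∀ (k : Nat) (text : String) (index : Int),
    (2 - index).toNat ≤ k → stripper text index = stripper_alt text index := by
  intro k
  induction k with
  | zero =>
    intro text index hk
    rw [stripper.eq_def, stripper_alt.eq_def]
    cases hg : PySem.List.pyGet? (["{", ":", ","] : List String) index with
    | none => rfl
    | some d =>
      dsimp only
      rw [if_neg (by simp only [List.length_cons, List.length_nil]; push_cast; omega),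
          if_pos (by simp only [List.length_cons, List.length_nil, ge_iff_le]; push_cast; omega)]
      rw [fold_eq_join d _ _ "" 0 (by simp), str_empty_append]
  | succ k ih =>
    intro text index hk
    rw [stripper.eq_def, stripper_alt.eq_def]
    cases hg : PySem.List.pyGet? (["{", ":", ","] : List String) index with
    | none => rfl
    | some d =>
      dsimp only
      rw [fold_eq_join d _ _ "" 0 (by simp), str_empty_append]
      by_cases hlt : index + 1 < ((["{", ":", ","] : List String).length : Int)
      · rw [if_pos hlt,
            if_neg (by simp only [List.length_cons, List.length_nil, ge_iff_le] at hlt ⊢; omega)]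
        exact ih _ (index + 1)
          (by simp only [List.length_cons, List.length_nil] at hlt; push_cast at hlt; omega)
      · rw [if_neg hlt,
            if_pos (by simp only [List.length_cons, List.length_nil, ge_iff_le] at hlt ⊢; omega)]

-- ===== VERDICT (by name: the statement is the Claim_ definition above) =====
theorem stripper_spec : Claim_equal_stripper := by
  intro text index _ _
  unfold Spec_stripper
  exact stripper_eq_alt (2 - index).toNat text index le_rfl
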